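-- pv_equiv track=rewrite | github.com/nojhan/aapssfc | src/pendu_ordi_0.py | is_compatible
-- ===== SOURCE A (Python) =====
-- def is_compatible( word, partial_word ):
--     """ Teste si un mot complet est compatible avec un mot partiel.
--         Par exemple :
--         >>> from pendu_ordi import *
--         >>> is_compatible("hirondelle","_a____e__e")
--         False
--         >>> is_compatible("hirondelle","______e__e")
--         True
--     """
--     if len(word) != len(partial_word):
--         return False
--
--     for i in range(len(word)):
--         if partial_word[i] == "_":
--             continue
--
--         elif word[i] != partial_word[i]:
--             return False
--
--     return True
-- ===== SOURCE B (Python) =====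
-- def _match(pattern, chars):
--     if not pattern or not chars:
--         return not pattern and not chars
--     t = pattern[0]
--     return (t is None or t == chars[0]) and _match(pattern[1:], chars[1:])
--
-- def is_compatible(word, partial_word):
--     pattern = [None if ch == "_" else ch for ch in partial_word]
--     return _match(pattern, list(word))
-- ===== Notes on version B (the rewrite author's own statement) =====
-- stated objective: alternative
-- what changed: B compiles partial_word into a wildcard-token pattern (None = blank) and runs a recursive matcher over pattern and word simultaneously; the length check falls out of the recursion instead of an upfront test, and there is no index loop or early-return scan.
import Mathlib
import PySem

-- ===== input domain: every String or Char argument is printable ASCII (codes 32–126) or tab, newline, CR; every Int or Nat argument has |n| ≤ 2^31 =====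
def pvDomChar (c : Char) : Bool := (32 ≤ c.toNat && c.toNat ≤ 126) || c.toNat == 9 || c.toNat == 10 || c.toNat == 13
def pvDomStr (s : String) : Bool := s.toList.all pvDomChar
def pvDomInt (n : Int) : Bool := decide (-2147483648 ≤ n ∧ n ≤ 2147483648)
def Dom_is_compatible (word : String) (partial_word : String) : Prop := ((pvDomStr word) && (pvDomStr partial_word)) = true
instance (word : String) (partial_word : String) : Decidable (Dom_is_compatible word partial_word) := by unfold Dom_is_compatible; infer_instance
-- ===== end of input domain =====

-- B compiles partial_word into a wildcard-token pattern and matches it recursively against word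
-- (no upfront length test, no index loop); same values everywhere (alternative decomposition).

-- ===== PORT A =====
-- A's "for i in range(len(word))" loop with early return False, indexing both strings at i
-- (the loop is only entered with equal lengths, so the i-th index of each list is in range).
def isCompLoopA (w p : List Char) (i : Nat) : Bool :=
  if _h : i < w.length then
    if p.getD i ' ' == '_' then isCompLoopA w p (i + 1)
    else if w.getD i ' ' != p.getD i ' ' then false
    else isCompLoopA w p (i + 1)
  else true
termination_by w.length - i

def is_compatible (word : String) (partial_word : String) : Bool :=
  if word.toList.length ≠ partial_word.toList.length then false
  else isCompLoopA word.toList partial_word.toList 0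

-- ===== PORT B =====
-- Source B's _match: recursion on both sequences; empty cases demand both empty.
def matchPat : List (Option Char) → List Char → Bool
  | [], [] => true
  | [], _ :: _ => false
  | _ :: _, [] => false
  | t :: ts, c :: cs =>
    (match t with | none => true | some l => l == c) && matchPat ts cs

def is_compatible_alt (word : String) (partial_word : String) : Bool :=
  matchPat (partial_word.toList.map (fun ch => if ch == '_' then none else some ch))
    word.toList

-- ===== PRECONDITION & SPEC =====
def Spec_is_compatible (word : String) (partial_word : String) (out : Bool) : Prop := out = is_compatible_alt word partial_word
instance (word : String) (partial_word : String) (out : Bool) : Decidable (Spec_is_compatible word partial_word out) := by unfold Spec_is_compatible; infer_instance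

-- ===== CLAIM (what is proved, stated in full; the proofs are below) =====
def Claim_equal_is_compatible : Prop := ∀ (word : String) (partial_word : String), Dom_is_compatible word partial_word → Spec_is_compatible word partial_word (is_compatible word partial_word)

-- ===== LEMMAS AND PROOFS =====

theorem matchPat_cons (t : Option Char) (ts : List (Option Char)) (c : Char) (cs : List Char) :
    matchPat (t :: ts) (c :: cs) =
      ((match t with | none => true | some l => l == c) && matchPat ts cs) := rfl

theorem matchPat_len_ne (ts : List (Option Char)) (cs : List Char)
    (h : ts.length ≠ cs.length) : matchPat ts cs = false := by
  induction ts generalizing cs with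
  | nil => cases cs with
    | nil => simp at h
    | cons c cs => rfl
  | cons t ts ih => cases cs with
    | nil => rfl
    | cons c cs =>
      rw [matchPat_cons]
      have : ts.length ≠ cs.length := by simpa using h
      rw [ih cs this, Bool.and_false]

def compileP (p : List Char) : List (Option Char) :=
  p.map (fun ch => if ch == '_' then none else some ch)

theorem isCompLoopA_eq_matchPat (w p : List Char) (hlen : w.length = p.length) (i : Nat) :
    isCompLoopA w p i = matchPat (compileP (p.drop i)) (w.drop i) := by
  by_cases h : i < w.length
  · have hp : i < p.length := by omega
    have ih := isCompLoopA_eq_matchPat w p hlen (i + 1)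
    have hw : (w.drop i) = w[i] :: w.drop (i + 1) := List.drop_eq_getElem_cons h
    have hpd : (p.drop i) = p[i] :: p.drop (i + 1) := List.drop_eq_getElem_cons hp
    rw [isCompLoopA]
    simp only [h, dif_pos]
    rw [hw, hpd]
    simp only [compileP, List.map_cons]
    rw [List.getD_eq_getElem w ' ' h, List.getD_eq_getElem p ' ' hp, ih]
    by_cases h1 : p[i] == '_'
    · simp [matchPat, h1, compileP]
    · have h1' : ¬ p[i] = '_' := by simpa using h1
      rw [if_neg (by simpa using h1), matchPat_cons]
      by_cases h2 : w[i] == p[i]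
      · have h2' : (p[i] == w[i]) = true := by rw [beq_iff_eq] at h2 ⊢; exact h2.symm
        simp [bne, h2, h2', if_neg h1', compileP, List.map_drop]
      · have h2' : (p[i] == w[i]) = false := by
          rw [beq_eq_false_iff_ne]; rw [beq_iff_eq] at h2; exact fun e => h2 e.symm
        simp [bne, h2, h2', if_neg h1', compileP, List.map_drop]
  · rw [isCompLoopA]
    simp only [h, dif_neg, not_false_iff]
    rw [List.drop_eq_nil_of_le (Nat.le_of_not_lt h),
        List.drop_eq_nil_of_le (by omega : p.length ≤ i)]
    rfl
termination_by w.length - i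

-- ===== VERDICT (by name: the statement is the Claim_ definition above) =====
theorem is_compatible_spec : Claim_equal_is_compatible := by
  intro word partial_word _
  unfold Spec_is_compatible is_compatible is_compatible_alt
  by_cases h : word.toList.length = partial_word.toList.length
  · rw [if_neg (by simpa using h), isCompLoopA_eq_matchPat _ _ h 0]
    simp [compileP]
  · rw [if_pos h, matchPat_len_ne]
    simpa using fun e => h e.symm
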